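-- pv_equiv track=rewrite | github.com/pedronis/snap-cmds-spec | app.py | compatible_epochs
-- ===== SOURCE A (Python) =====
-- def compatible_epochs(e1, e2):
--     if e1 == e2:
--         return True
--     if e2.endswith('*'):
--         e2i = int(e2[:-1])
--         if compatible_epochs(str(e2i), e1) or compatible_epochs(str(e2i-1), e1):
--             return True
--     return False
-- ===== SOURCE B (Python) =====
-- def compatible_epochs(e1, e2):
--     if e1 == e2:
--         return True
--     if not e2.endswith('*'):
--         return False
--     b = int(e2[:-1])
--     if e1.endswith('*'):
--         a = int(e1[:-1])
--         return abs(a - b) <= 1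
--     return e1 == str(b) or e1 == str(b - 1)
-- ===== Notes on version B (the rewrite author's own statement) =====
-- stated objective: simpler
-- what changed: Replaced A's constant-depth double recursion (which re-enters itself with swapped arguments up to three levels deep) by a direct non-recursive case analysis, with the closed form abs(a-b) <= 1 for the both-wildcard case.
import Mathlib
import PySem

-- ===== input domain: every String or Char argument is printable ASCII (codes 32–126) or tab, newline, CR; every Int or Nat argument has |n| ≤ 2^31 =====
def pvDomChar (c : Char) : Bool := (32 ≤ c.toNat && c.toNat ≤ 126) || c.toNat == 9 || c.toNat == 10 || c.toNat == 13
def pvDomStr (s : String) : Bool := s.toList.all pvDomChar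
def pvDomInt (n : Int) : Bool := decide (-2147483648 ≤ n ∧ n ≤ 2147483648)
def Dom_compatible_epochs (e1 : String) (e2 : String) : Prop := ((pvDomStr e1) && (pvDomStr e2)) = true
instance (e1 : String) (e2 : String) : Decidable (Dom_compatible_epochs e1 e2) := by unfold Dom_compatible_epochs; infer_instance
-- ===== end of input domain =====

-- B replaces A's constant-depth double recursion by a direct non-recursive case
-- analysis with the closed form |a-b| <= 1 for the both-wildcard case (objective: simpler).


-- Helpers needed by PORT A's termination argument (cited in `decreasing_by`):
-- str(n) never ends with '*', so each recursive call strictly lowers the number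
-- of wildcard-suffixed arguments.
theorem pvMemToDigitsCore (f : Nat) : ∀ (n : Nat) (acc : List Char) (c : Char),
    c ∈ Nat.toDigitsCore 10 f n acc → c ∈ acc ∨ ∃ d, d < 10 ∧ c = Nat.digitChar d := by
  induction f with
  | zero => intro n acc c h; exact Or.inl h
  | succ f ih =>
    intro n acc c h
    simp only [Nat.toDigitsCore] at h
    split at h
    · rcases List.mem_cons.mp h with h | h
      · exact Or.inr ⟨n % 10, Nat.mod_lt _ (by norm_num), h⟩
      · exact Or.inl h
    · rcases ih _ _ _ h with h | h
      · rcases List.mem_cons.mp h with h | h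
        · exact Or.inr ⟨n % 10, Nat.mod_lt _ (by norm_num), h⟩
        · exact Or.inl h
      · exact Or.inr h

theorem pvMemToChars (n : Int) (c : Char) (h : c ∈ PySem.Int.toChars n) :
    c = '-' ∨ ∃ d, d < 10 ∧ c = Nat.digitChar d := by
  unfold PySem.Int.toChars at h
  split at h
  · rcases List.mem_cons.mp h with h | h
    · exact Or.inl h
    · rcases pvMemToDigitsCore _ _ _ _ h with h | h
      · simp at h
      · exact Or.inr h
  · rcases pvMemToDigitsCore _ _ _ _ h with h | h
    · simp at h
    · exact Or.inr h

theorem pvDigitCharTame : ∀ d, d < 10 → Nat.digitChar d ≠ '*' ∧ Nat.digitChar d ≠ '-' := by decide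

theorem pvToCharsNoStar (n : Int) : PySem.Chars.endswith (PySem.Int.toChars n) ['*'] = false := by
  rw [← Bool.not_eq_true, PySem.Chars.endswith_iff]
  intro hsuf
  have hmem : '*' ∈ PySem.Int.toChars n := hsuf.sublist.subset (by decide : '*' ∈ ['*'])
  rcases pvMemToChars n '*' hmem with h | ⟨d, hd, h⟩
  · exact absurd h (by decide)
  · exact (pvDigitCharTame d hd).1 h.symm


-- ===== PORT A =====
set_option maxHeartbeats 1000000 in
def compatible_epochs (e1 : String) (e2 : String) : Bool :=
  if e1 == e2 then true
  else
    if h : PySem.Str.endswith e2 "*" = true then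
      match PySem.Int.ofStr? (PySem.Str.slice e2 none (some (-1))) with
      | none => false      -- int() raises ValueError here; excluded by Pre_
      | some e2i =>
        if compatible_epochs (PySem.Int.toStr e2i) e1
            || compatible_epochs (PySem.Int.toStr (e2i - 1)) e1 then true
        else false
    else false
termination_by (if PySem.Str.endswith e1 "*" then 1 else 0) + (if PySem.Str.endswith e2 "*" then 1 else 0)
decreasing_by
  all_goals
    have h' : PySem.Chars.endswith e2.toList ['*'] = true := by simpa using h
    simp [pvToCharsNoStar, h']

-- ===== PORT B =====
def compatible_epochs_alt (e1 : String) (e2 : String) : Bool :=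
  if e1 == e2 then true
  else if PySem.Str.endswith e2 "*" then
    match PySem.Int.ofStr? (PySem.Str.slice e2 none (some (-1))) with
    | none => false        -- int() raises ValueError here; excluded by Pre_
    | some b =>
      if PySem.Str.endswith e1 "*" then
        match PySem.Int.ofStr? (PySem.Str.slice e1 none (some (-1))) with
        | none => false    -- int() raises ValueError here; excluded by Pre_
        | some a => decide ((a - b).natAbs ≤ 1)
      else e1 == PySem.Int.toStr b || e1 == PySem.Int.toStr (b - 1)
  else false

-- ===== PRECONDITION & SPEC =====
-- Pre_ excludes exactly the inputs where Python A raises ValueError: e1 ≠ e2, e2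
-- ends with '*', and int(e2[:-1]) (or, when e1 also ends with '*', int(e1[:-1])) fails.
def Pre_compatible_epochs (e1 : String) (e2 : String) : Prop :=
  e1 ≠ e2 → PySem.Str.endswith e2 "*" = true →
    (PySem.Int.ofStr? (PySem.Str.slice e2 none (some (-1)))).isSome = true ∧
    (PySem.Str.endswith e1 "*" = true →
      (PySem.Int.ofStr? (PySem.Str.slice e1 none (some (-1)))).isSome = true)
instance (e1 : String) (e2 : String) : Decidable (Pre_compatible_epochs e1 e2) := by
  unfold Pre_compatible_epochs; infer_instance

def pvWitness_compatible_epochs : String × String := ("1*", "2*")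

def Spec_compatible_epochs (e1 : String) (e2 : String) (out : Bool) : Prop := out = compatible_epochs_alt e1 e2
instance (e1 : String) (e2 : String) (out : Bool) : Decidable (Spec_compatible_epochs e1 e2 out) := by unfold Spec_compatible_epochs; infer_instance

-- ===== CLAIM (what is proved, stated in full; the proofs are below) =====
def Claim_equal_compatible_epochs : Prop := ∀ (e1 : String) (e2 : String), Dom_compatible_epochs e1 e2 → Pre_compatible_epochs e1 e2 → Spec_compatible_epochs e1 e2 (compatible_epochs e1 e2)

-- ===== LEMMAS AND PROOFS =====
theorem pvToStrNoStar (n : Int) : PySem.Str.endswith (PySem.Int.toStr n) "*" = false := by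
  rw [PySem.Str.endswith_eq, PySem.Int.toList_toStr]
  exact pvToCharsNoStar n

-- str(n) is injective (decimal digits, via Nat.toDigits 10)
theorem pvToDigitsCoreEq (n : Nat) : ∀ (f : Nat) (acc : List Char), n < f →
    Nat.toDigitsCore 10 f n acc = Nat.toDigits 10 n ++ acc := by
  induction n using Nat.strong_induction_on with
  | _ n ih =>
    intro f acc hf
    obtain ⟨f, rfl⟩ : ∃ f', f = f' + 1 := ⟨f - 1, by omega⟩
    by_cases h0 : n / 10 = 0
    · simp only [Nat.toDigitsCore, Nat.toDigits, h0, if_pos]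
      simp
    · have hn : 10 ≤ n := by omega
      have hlt : n / 10 < n := by omega
      simp only [Nat.toDigitsCore, Nat.toDigits, h0, ite_false]
      rw [ih (n / 10) hlt f _ (by omega), ih (n / 10) hlt n _ (by omega)]
      simp

theorem pvToDigitsSmall {n : Nat} (h : n < 10) : Nat.toDigits 10 n = [Nat.digitChar n] := by
  have h0 : n / 10 = 0 := by omega
  have h1 : n % 10 = n := by omega
  simp [Nat.toDigits, Nat.toDigitsCore, h0, h1]

theorem pvToDigitsStep {n : Nat} (h : 10 ≤ n) :
    Nat.toDigits 10 n = Nat.toDigits 10 (n / 10) ++ [Nat.digitChar (n % 10)] := by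
  have h0 : ¬ n / 10 = 0 := by omega
  conv_lhs => rw [Nat.toDigits]
  simp only [Nat.toDigitsCore, h0, ite_false]
  exact pvToDigitsCoreEq (n / 10) n [Nat.digitChar (n % 10)] (by omega)

theorem pvToDigitsNeNil (n : Nat) : Nat.toDigits 10 n ≠ [] := by
  by_cases h : n < 10
  · rw [pvToDigitsSmall h]; simp
  · rw [pvToDigitsStep (by omega)]; simp

theorem pvDigitCharInj : ∀ d, d < 10 → ∀ e, e < 10 → Nat.digitChar d = Nat.digitChar e → d = e := by decide

theorem pvToDigitsInj : ∀ m : Nat, ∀ n : Nat, Nat.toDigits 10 m = Nat.toDigits 10 n → m = n := by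
  intro m
  induction m using Nat.strong_induction_on with
  | _ m ih =>
    intro n h
    by_cases hm : m < 10 <;> by_cases hn : n < 10
    · rw [pvToDigitsSmall hm, pvToDigitsSmall hn] at h
      exact pvDigitCharInj m hm n hn (List.head_eq_of_cons_eq h)
    · rw [pvToDigitsSmall hm, pvToDigitsStep (n := n) (by omega)] at h
      have hlen : (1 : Nat) = (Nat.toDigits 10 (n / 10)).length + 1 := by
        simpa using congrArg List.length h
      exact absurd (List.length_eq_zero_iff.mp (by omega)) (pvToDigitsNeNil (n / 10))
    · rw [pvToDigitsStep (n := m) (by omega), pvToDigitsSmall hn] at h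
      have hlen : (Nat.toDigits 10 (m / 10)).length + 1 = (1 : Nat) := by
        simpa using congrArg List.length h
      exact absurd (List.length_eq_zero_iff.mp (by omega)) (pvToDigitsNeNil (m / 10))
    · rw [pvToDigitsStep (n := m) (by omega), pvToDigitsStep (n := n) (by omega)] at h
      obtain ⟨h1, h2⟩ := List.append_inj' h rfl
      have hdiv : m / 10 = n / 10 := ih (m / 10) (by omega) (n / 10) h1
      have hmod : m % 10 = n % 10 :=
        pvDigitCharInj _ (Nat.mod_lt _ (by norm_num)) _ (Nat.mod_lt _ (by norm_num))
          (List.head_eq_of_cons_eq h2)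
      omega

theorem pvToCharsInj (m n : Int) (h : PySem.Int.toChars m = PySem.Int.toChars n) : m = n := by
  have hd : ∀ k : Nat, '-' ∉ Nat.toDigits 10 k := by
    intro k hk
    rcases pvMemToDigitsCore _ _ _ _ hk with hk | ⟨d, hlt, he⟩
    · simp at hk
    · exact (pvDigitCharTame d hlt).2 he.symm
  unfold PySem.Int.toChars at h
  split_ifs at h with h1 h2 h2
  · have := pvToDigitsInj _ _ (List.tail_eq_of_cons_eq h)
    omega
  · exact absurd (h ▸ List.mem_cons_self) (hd n.toNat)
  · exact absurd (h.symm ▸ List.mem_cons_self) (hd m.toNat)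
  · have := pvToDigitsInj _ _ h
    omega

theorem pvToStrInj (m n : Int) (h : PySem.Int.toStr m = PySem.Int.toStr n) : m = n := by
  apply pvToCharsInj
  rw [← PySem.Int.toList_toStr, ← PySem.Int.toList_toStr, h]

theorem pvBeqToStr (x y : Int) : (PySem.Int.toStr x == PySem.Int.toStr y) = decide (x = y) := by
  by_cases h : x = y
  · simp [h]
  · simp only [decide_eq_false h]
    exact beq_eq_false_iff_ne.mpr (fun he => h (pvToStrInj x y he))

theorem pvBeqToStrNe (n : Int) (s : String) (hs : PySem.Str.endswith s "*" = true) :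
    (PySem.Int.toStr n == s) = false :=
  beq_eq_false_iff_ne.mpr (fun he => by rw [← he, pvToStrNoStar] at hs; cases hs)

theorem pvIfTrueFalse (x : Bool) : (if x = true then true else false) = x := by cases x <;> rfl

-- A's inner call compatible_epochs(str(n), s) when s has no wildcard: plain equality
theorem pvCeNum (n : Int) (s : String) (hs : PySem.Str.endswith s "*" = false) :
    compatible_epochs (PySem.Int.toStr n) s = (PySem.Int.toStr n == s) := by
  rw [compatible_epochs]
  simp only [hs, Bool.false_eq_true, dite_false, pvIfTrueFalse]

-- A's inner call compatible_epochs(str(n), s) when s = <a>'*'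
theorem pvCeWild (n : Int) (s : String) (hs : PySem.Str.endswith s "*" = true)
    (a : Int) (ha : PySem.Int.ofStr? (PySem.Str.slice s none (some (-1))) = some a) :
    compatible_epochs (PySem.Int.toStr n) s = (decide (a = n) || decide (a - 1 = n)) := by
  rw [compatible_epochs]
  simp only [pvBeqToStrNe n s hs, Bool.false_eq_true, if_false, hs, dite_true, ha]
  rw [pvCeNum a (PySem.Int.toStr n) (pvToStrNoStar n),
      pvCeNum (a - 1) (PySem.Int.toStr n) (pvToStrNoStar n),
      pvBeqToStr, pvBeqToStr, pvIfTrueFalse]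

-- ===== VERDICT (by name: the statement is the Claim_ definition above) =====
theorem compatible_epochs_spec : Claim_equal_compatible_epochs := by
  intro e1 e2 _ hpre
  unfold Spec_compatible_epochs
  rw [compatible_epochs, compatible_epochs_alt]
  by_cases h12 : (e1 == e2) = true
  · simp [h12]
  · have hne : e1 ≠ e2 := fun h => h12 (by simp [h])
    simp only [h12, Bool.false_eq_true, if_false]
    by_cases hs2 : PySem.Str.endswith e2 "*" = true
    · simp only [hs2, dite_true, if_true]
      rcases hb2 : PySem.Int.ofStr? (PySem.Str.slice e2 none (some (-1))) with _ | b
      · exact absurd ((hpre hne hs2).1) (by rw [hb2]; simp)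
      · by_cases hs1 : PySem.Str.endswith e1 "*" = true
        · rcases ha1 : PySem.Int.ofStr? (PySem.Str.slice e1 none (some (-1))) with _ | a
          · exact absurd ((hpre hne hs2).2 hs1) (by rw [ha1]; simp)
          · simp only [hs1, if_true]
            rw [pvCeWild b e1 hs1 a ha1, pvCeWild (b - 1) e1 hs1 a ha1, pvIfTrueFalse]
            apply Bool.eq_iff_iff.mpr
            simp only [Bool.or_eq_true, decide_eq_true_eq]
            omega
        · have hs1' : PySem.Str.endswith e1 "*" = false := by
            cases h : PySem.Str.endswith e1 "*" <;> simp_all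
          simp only [hs1', Bool.false_eq_true, if_false]
          rw [pvCeNum b e1 hs1', pvCeNum (b - 1) e1 hs1', pvIfTrueFalse]
          rw [BEq.comm (a := PySem.Int.toStr b), BEq.comm (a := PySem.Int.toStr (b - 1))]
    · have hs2' : PySem.Str.endswith e2 "*" = false := by
        cases h : PySem.Str.endswith e2 "*" <;> simp_all
      simp only [hs2', Bool.false_eq_true, dite_false, if_false]
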